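-- pv_equiv track=rewrite | github.com/julianghill/openrelik-worker-clamav | src/tasks.py | parse_clamscan_output
-- ===== SOURCE A (Python) =====
-- from typing import Callable, Dict, List, Optional, Tuple
--
-- def parse_clamscan_output(output: str) -> Tuple[List[Dict[str, str]], Dict[str, str]]:
--     """Parse clamscan stdout into per-file results and summary."""
--     items: List[Dict[str, str]] = []
--     summary: Dict[str, str] = {}
--     in_summary = False
--
--     for raw_line in output.splitlines():
--         line = raw_line.strip()
--         if not line:
--             continue
--         if line.startswith("----------- SCAN SUMMARY"):
--             in_summary = True
--             continue
--         if in_summary: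
--             if ":" in line:
--                 key, value = line.split(":", 1)
--                 summary[key.strip()] = value.strip()
--             continue
--         if ": " not in line:
--             continue
--
--         path, status = line.split(": ", 1)
--         signature = None
--         result = status
--
--         if status.endswith("FOUND"):
--             result = "FOUND"
--             signature = status.rsplit(" ", 1)[0]
--         elif status == "OK":
--             result = "OK"
--
--         items.append({"path": path, "result": result, "signature": signature})
--
--     return items, summary
-- ===== SOURCE B (Python) =====
-- _MARKER = "----------- SCAN SUMMARY"
--
--
-- def _parse_item(line):
--     path, status = line.split(": ", 1)
--     if status.endswith("FOUND"):
--         return {"path": path, "result": "FOUND", "signature": status.rsplit(" ", 1)[0]}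
--     if status == "OK":
--         return {"path": path, "result": "OK", "signature": None}
--     return {"path": path, "result": status, "signature": None}
--
--
-- def parse_clamscan_output(output):
--     """Parse clamscan stdout into per-file results and summary."""
--     lines = [s for s in (raw.strip() for raw in output.splitlines()) if s]
--     idx = next((i for i, l in enumerate(lines) if l.startswith(_MARKER)), len(lines))
--     items = [_parse_item(l) for l in lines[:idx] if ": " in l]
--     summary = {}
--     for l in lines[idx:]:
--         if not l.startswith(_MARKER) and ":" in l:
--             k, v = l.split(":", 1)
--             summary[k.strip()] = v.strip()
--     return items, summary
-- ===== Notes on version B (the rewrite author's own statement) =====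
-- stated objective: simpler
-- what changed: Replaces A's single stateful line loop with an in_summary flag by a stateless decomposition: strip and drop blank lines once, locate the first SCAN SUMMARY marker, then parse the section before it into items with a comprehension and fold the section after it into the summary dict.
import Mathlib
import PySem

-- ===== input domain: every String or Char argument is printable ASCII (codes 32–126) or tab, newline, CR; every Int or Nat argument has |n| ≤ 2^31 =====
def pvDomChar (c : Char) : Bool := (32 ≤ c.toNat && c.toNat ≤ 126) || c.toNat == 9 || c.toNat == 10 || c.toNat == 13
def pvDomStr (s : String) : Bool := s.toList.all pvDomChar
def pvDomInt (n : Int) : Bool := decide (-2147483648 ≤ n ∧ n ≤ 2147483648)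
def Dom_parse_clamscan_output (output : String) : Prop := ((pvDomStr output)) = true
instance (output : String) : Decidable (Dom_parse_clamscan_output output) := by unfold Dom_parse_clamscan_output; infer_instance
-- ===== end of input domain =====

-- B re-decomposes A's stateful line loop: split the stripped non-blank lines at the first
-- SCAN SUMMARY marker, then parse the two sections independently (objective: simpler decomposition).

-- ===== PORT A =====

def pvMarker : String := "----------- SCAN SUMMARY"

-- hand port of `s.rsplit(" ", 1)[0]` (no PySem rsplit): exact, since rfind is the last occurrence
def pvRsplitSpace0 (s : String) : String :=
  let i := PySem.Str.rfind s " "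
  if i = -1 then s else PySem.Str.slice s none (some i)

-- `key, value = line.split(":", 1); summary[key.strip()] = value.strip()` (guard ":" in line makes 2 parts)
def pvSummaryAdd (summary : PySem.Dict String String) (line : String) : PySem.Dict String String :=
  match (PySem.Str.splitMax? line ":" 1).getD [] with
  | key :: value :: _ => summary.insert (PySem.Str.strip key) (PySem.Str.strip value)
  | _ => summary

-- the item-building tail of A's loop body (path/status split, mutable result/signature as a pair)
def pvItemA (line : String) : List (String × Option String) :=
  match (PySem.Str.splitMax? line ": " 1).getD [] with
  | path :: status :: _ =>
    let rs : String × Option String :=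
      if PySem.Str.endswith status "FOUND" then ("FOUND", some (pvRsplitSpace0 status))
      else if status = "OK" then ("OK", none)
      else (status, none)
    [("path", some path), ("result", some rs.1), ("signature", rs.2)]
  | _ => []

def pvALoop : List String → List (List (String × Option String)) → PySem.Dict String String → Bool →
    (List (List (String × Option String))) × PySem.Dict String String
  | [], items, summary, _ => (items, summary)
  | raw :: rest, items, summary, insum =>
    let line := PySem.Str.strip raw
    if line = "" then pvALoop rest items summary insum
    else if PySem.Str.startswith line pvMarker then pvALoop rest items summary true
    else if insum then
      if PySem.Str.isIn ":" line then pvALoop rest items (pvSummaryAdd summary line) insum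
      else pvALoop rest items summary insum
    else if PySem.Str.isIn ": " line then pvALoop rest (items ++ [pvItemA line]) summary insum
    else pvALoop rest items summary insum

def parse_clamscan_output (output : String) : (List (List (String × Option String))) × (List (String × String)) :=
  let r := pvALoop (PySem.Str.splitlines output) [] PySem.Dict.empty false
  (r.1, r.2.items)

-- ===== PORT B =====

def pvParseItemB (line : String) : List (String × Option String) :=
  match (PySem.Str.splitMax? line ": " 1).getD [] with
  | path :: status :: _ =>
    if PySem.Str.endswith status "FOUND" then
      [("path", some path), ("result", some "FOUND"), ("signature", some (pvRsplitSpace0 status))]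
    else if status = "OK" then
      [("path", some path), ("result", some "OK"), ("signature", none)]
    else
      [("path", some path), ("result", some status), ("signature", none)]
  | _ => []

def pvCleanLines (output : String) : List String :=
  ((PySem.Str.splitlines output).map PySem.Str.strip).filter (fun s => s ≠ "")

def parse_clamscan_output_alt (output : String) : (List (List (String × Option String))) × (List (String × String)) :=
  let lines := pvCleanLines output
  let idx := lines.findIdx (fun l => PySem.Str.startswith l pvMarker)
  let items := ((lines.take idx).filter (fun l => PySem.Str.isIn ": " l)).map pvParseItemB
  let summary := (lines.drop idx).foldl
    (fun d l => if !PySem.Str.startswith l pvMarker && PySem.Str.isIn ":" l then pvSummaryAdd d l else d)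
    PySem.Dict.empty
  (items, summary.items)

-- ===== PRECONDITION & SPEC =====
def Spec_parse_clamscan_output (output : String) (out : (List (List (String × Option String))) × (List (String × String))) : Prop := out = parse_clamscan_output_alt output
instance (output : String) (out : (List (List (String × Option String))) × (List (String × String))) : Decidable (Spec_parse_clamscan_output output out) := by unfold Spec_parse_clamscan_output; infer_instance

-- ===== CLAIM (what is proved, stated in full; the proofs are below) =====
def Claim_equal_parse_clamscan_output : Prop := ∀ (output : String), Dom_parse_clamscan_output output → Spec_parse_clamscan_output output (parse_clamscan_output output)

-- ===== LEMMAS AND PROOFS =====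

-- B's summary fold step, named for the lemmas
def pvStepB (d : PySem.Dict String String) (l : String) : PySem.Dict String String :=
  if !PySem.Str.startswith l pvMarker && PySem.Str.isIn ":" l then pvSummaryAdd d l else d

theorem pvStepB_marker {d : PySem.Dict String String} {l : String}
    (hm : PySem.Str.startswith l pvMarker = true) : pvStepB d l = d := by
  unfold pvStepB; rw [hm]; rfl

theorem pvStepB_colon {d : PySem.Dict String String} {l : String}
    (hm : ¬ PySem.Str.startswith l pvMarker = true) (hc : PySem.Str.isIn ":" l = true) :
    pvStepB d l = pvSummaryAdd d l := by
  unfold pvStepB; rw [Bool.not_eq_true] at hm; rw [hm, hc]; rfl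

theorem pvStepB_nocolon {d : PySem.Dict String String} {l : String}
    (hc : ¬ PySem.Str.isIn ":" l = true) : pvStepB d l = d := by
  unfold pvStepB; rw [Bool.not_eq_true] at hc; rw [hc, Bool.and_false]; rfl

theorem pvItem_eq (l : String) : pvItemA l = pvParseItemB l := by
  unfold pvItemA pvParseItemB
  cases (PySem.Str.splitMax? l ": " 1).getD [] with
  | nil => rfl
  | cons p t =>
    cases t with
    | nil => rfl
    | cons s t' => dsimp only; split_ifs <;> rfl

theorem pvALoop_true (ls : List String) :
    ∀ items summary, pvALoop ls items summary true =
      (items, (((ls.map PySem.Str.strip).filter (fun s => s ≠ "")).foldl pvStepB summary)) := by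
  induction ls with
  | nil => intro items summary; rfl
  | cons raw rest ih =>
    intro items summary
    simp only [pvALoop, List.map_cons]
    by_cases hb : PySem.Str.strip raw = ""
    · rw [if_pos hb, List.filter_cons_of_neg (by simp [hb]), ih]
    · rw [if_neg hb, List.filter_cons_of_pos (by simp [hb]), List.foldl_cons]
      by_cases hm : PySem.Str.startswith (PySem.Str.strip raw) pvMarker = true
      · rw [if_pos hm, ih, pvStepB_marker hm]
      · rw [if_neg hm, if_pos trivial]
        by_cases hc : PySem.Str.isIn ":" (PySem.Str.strip raw) = true
        · rw [if_pos hc, ih, pvStepB_colon hm hc]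
        · rw [if_neg hc, ih, pvStepB_nocolon hc]

theorem pvALoop_false (ls : List String) :
    ∀ items summary,
      pvALoop ls items summary false =
        (let lines := (ls.map PySem.Str.strip).filter (fun s => s ≠ "")
         let idx := lines.findIdx (fun l => PySem.Str.startswith l pvMarker)
         (items ++ ((lines.take idx).filter (fun l => PySem.Str.isIn ": " l)).map pvItemA,
          (lines.drop idx).foldl pvStepB summary)) := by
  induction ls with
  | nil => intro items summary; simp [pvALoop]
  | cons raw rest ih =>
    intro items summary
    simp only [pvALoop, List.map_cons]
    by_cases hb : PySem.Str.strip raw = ""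
    · rw [if_pos hb, List.filter_cons_of_neg (by simp [hb]), ih]
    · rw [if_neg hb, List.filter_cons_of_pos (by simp [hb])]
      by_cases hm : PySem.Str.startswith (PySem.Str.strip raw) pvMarker = true
      · -- first marker line: idx = 0; the marker line itself is skipped by pvStepB
        rw [if_pos hm, pvALoop_true]
        simp only [List.findIdx_cons, hm, cond_true, List.take_zero, List.filter_nil,
          List.map_nil, List.append_nil, List.drop_zero, List.foldl_cons]
        rw [pvStepB_marker hm]
      · rw [if_neg hm, if_neg (by simp)]
        simp only [List.findIdx_cons, hm, cond_false, List.take_succ_cons, List.drop_succ_cons]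
        by_cases hc : PySem.Str.isIn ": " (PySem.Str.strip raw) = true
        · rw [if_pos hc, ih, List.filter_cons_of_pos hc, List.map_cons]
          simp only [List.append_assoc, List.singleton_append]
        · rw [if_neg hc, ih, List.filter_cons_of_neg hc]

-- ===== VERDICT (by name: the statement is the Claim_ definition above) =====
theorem parse_clamscan_output_spec : Claim_equal_parse_clamscan_output := by
  intro output _
  unfold Spec_parse_clamscan_output parse_clamscan_output parse_clamscan_output_alt pvCleanLines
  rw [pvALoop_false]
  have hmap : pvItemA = pvParseItemB := funext pvItem_eq
  dsimp only
  rw [List.nil_append, hmap]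
  rfl
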